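-- pv_equiv track=rewrite | github.com/tbneilsen/uw-measurements | analysis/Analysis.py | prev_power_of_two
-- ===== SOURCE A (Python) =====
-- def prev_power_of_two(x):       #determine power of 2 best for ns
--     prev = False
--     ii = 0
--     while not prev:
--         val = 2 ** ii
--         if val > x:
--             break
--         else:
--             ii += 1
--     return ii - 1
-- ===== SOURCE B (Python) =====
-- def prev_power_of_two(x):
--     ii = -1
--     v = x
--     while v >= 1:
--         v = v // 2
--         ii += 1
--     return ii
-- ===== Notes on version B (the rewrite author's own statement) =====
-- stated objective: alternative
-- what changed: Replaces the upward search that recomputes a growing power of two each pass until it exceeds x with a downward floor-halving counter on x itself.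
import Mathlib
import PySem

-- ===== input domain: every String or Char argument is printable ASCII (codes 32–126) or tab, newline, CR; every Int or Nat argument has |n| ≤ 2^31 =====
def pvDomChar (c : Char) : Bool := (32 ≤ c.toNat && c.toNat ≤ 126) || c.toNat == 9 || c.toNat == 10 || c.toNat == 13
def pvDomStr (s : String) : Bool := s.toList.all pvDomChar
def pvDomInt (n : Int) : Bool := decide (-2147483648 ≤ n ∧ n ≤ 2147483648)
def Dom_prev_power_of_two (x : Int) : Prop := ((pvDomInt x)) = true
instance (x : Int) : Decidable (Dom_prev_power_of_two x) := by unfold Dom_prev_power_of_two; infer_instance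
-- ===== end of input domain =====

-- B replaces A's upward search that recomputes 2**ii each pass with a downward
-- floor-halving counter on x itself (objective: alternative, same asymptotic cost).

-- ===== PORT A =====
-- A's while loop: ii counts up from 0 until 2**ii > x; returns final ii.
def pvALoop (x : Int) (ii : Nat) : Nat :=
  if 2 ^ ii > x then ii else pvALoop x (ii + 1)
termination_by (x + 1 - 2 ^ ii).toNat
decreasing_by
  have h1 : (0:Int) < 2 ^ ii := pow_pos (by norm_num) ii
  have h2 : (2:Int) ^ (ii + 1) = 2 * 2 ^ ii := by ring
  omega
-- (h1/h2 feed omega the pow facts it cannot derive itself)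

def prev_power_of_two (x : Int) : Int := (pvALoop x 0 : Int) - 1

-- ===== PORT B =====
-- B's while loop: v is halved (Python //) while v >= 1, ii counts the halvings from -1.
def pvBLoop (v : Int) (ii : Int) : Int :=
  if v ≥ 1 then pvBLoop (PySem.Int.floordiv v 2) (ii + 1) else ii
termination_by v.toNat
decreasing_by
  rename_i h
  have h1 : PySem.Int.floordiv v 2 < v := (PySem.Int.floordiv_lt_iff_lt_mul (by norm_num)).mpr (by omega)
  have h2 : (0:Int) ≤ PySem.Int.floordiv v 2 := (PySem.Int.le_floordiv_iff_mul_le (by norm_num)).mpr (by omega)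
  omega

def prev_power_of_two_alt (x : Int) : Int := pvBLoop x (-1)

-- ===== PRECONDITION & SPEC =====
def Spec_prev_power_of_two (x : Int) (out : Int) : Prop := out = prev_power_of_two_alt x
instance (x : Int) (out : Int) : Decidable (Spec_prev_power_of_two x out) := by unfold Spec_prev_power_of_two; infer_instance

-- ===== CLAIM (what is proved, stated in full; the proofs are below) =====
def Claim_equal_prev_power_of_two : Prop := ∀ (x : Int), Dom_prev_power_of_two x → Spec_prev_power_of_two x (prev_power_of_two x)

-- ===== LEMMAS AND PROOFS =====

theorem pvBLoop_shift (v ii : Int) : pvBLoop v ii = pvBLoop v 0 + ii := by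
  by_cases h : v ≥ 1
  · have e1 : pvBLoop v ii = pvBLoop (PySem.Int.floordiv v 2) (ii + 1) := by
      rw [pvBLoop, if_pos h]
    have e2 : pvBLoop v 0 = pvBLoop (PySem.Int.floordiv v 2) (0 + 1) := by
      rw [pvBLoop, if_pos h]
    rw [e1, e2, pvBLoop_shift (PySem.Int.floordiv v 2) (ii + 1),
      pvBLoop_shift (PySem.Int.floordiv v 2) (0 + 1)]
    ring
  · rw [pvBLoop, if_neg h, pvBLoop, if_neg h]; ring
termination_by v.toNat
decreasing_by
  all_goals
    have h1 : PySem.Int.floordiv v 2 < v := (PySem.Int.floordiv_lt_iff_lt_mul (by norm_num)).mpr (by omega)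
    have h2 : (0:Int) ≤ PySem.Int.floordiv v 2 := (PySem.Int.le_floordiv_iff_mul_le (by norm_num)).mpr (by omega)
    omega

theorem pvALoop_eq_pvBLoop (x : Int) (ii : Nat) :
    (pvALoop x ii : Int) = (ii : Int) + pvBLoop (PySem.Int.floordiv x (2 ^ ii)) 0 := by
  have hp : (0:Int) < 2 ^ ii := pow_pos (by norm_num) ii
  by_cases h : 2 ^ ii > x
  · -- loop exits: x // 2^ii < 1, so the B-loop body never runs
    have hlt : PySem.Int.floordiv x (2 ^ ii) < 1 :=
      (PySem.Int.floordiv_lt_iff_lt_mul hp).mpr (by linarith)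
    have e0 : pvBLoop (PySem.Int.floordiv x (2 ^ ii)) 0 = 0 := by
      rw [pvBLoop, if_neg (by omega)]
    rw [pvALoop, if_pos h, e0]
    ring
  · -- loop continues: x // 2^ii ≥ 1, one more halving matches one more step
    have hge : 1 ≤ PySem.Int.floordiv x (2 ^ ii) :=
      (PySem.Int.le_floordiv_iff_mul_le hp).mpr (by linarith)
    have hdiv : PySem.Int.floordiv (PySem.Int.floordiv x (2 ^ ii)) 2
        = PySem.Int.floordiv x (2 ^ (ii + 1)) := by
      rw [PySem.Int.floordiv_eq_ediv_of_pos hp,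
        PySem.Int.floordiv_eq_ediv_of_pos (show (0:Int) < 2 by norm_num),
        PySem.Int.floordiv_eq_ediv_of_pos (pow_pos (by norm_num) (ii + 1)),
        Int.ediv_ediv_of_nonneg (le_of_lt hp), pow_succ]
    have hstep : pvBLoop (PySem.Int.floordiv x (2 ^ ii)) 0
        = pvBLoop (PySem.Int.floordiv (PySem.Int.floordiv x (2 ^ ii)) 2) (0 + 1) := by
      rw [pvBLoop, if_pos hge]
    rw [pvALoop, if_neg h, pvALoop_eq_pvBLoop x (ii + 1), hstep, hdiv,
      pvBLoop_shift _ (0 + 1)]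
    push_cast
    ring
termination_by (x + 1 - 2 ^ ii).toNat
decreasing_by
  have h1 : (0:Int) < 2 ^ ii := pow_pos (by norm_num) ii
  have h2 : (2:Int) ^ (ii + 1) = 2 * 2 ^ ii := by ring
  omega

-- ===== VERDICT (by name: the statement is the Claim_ definition above) =====
theorem prev_power_of_two_spec : Claim_equal_prev_power_of_two := by
  intro x _
  unfold Spec_prev_power_of_two prev_power_of_two prev_power_of_two_alt
  have h := pvALoop_eq_pvBLoop x 0
  have h1 : PySem.Int.floordiv x (2 ^ 0) = x := by
    rw [pow_zero, PySem.Int.floordiv_eq_ediv_of_pos (by norm_num), Int.ediv_one]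
  rw [h1] at h
  rw [h, pvBLoop_shift x (-1)]
  push_cast
  ring
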